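-- pv_equiv track=rewrite | github.com/MM14475/WSN_DataPrep | wsn_preprocesse_ver2.2.py | generate_node_list
-- ===== SOURCE A (Python) =====
-- from typing import List, Dict, Any
--
-- def generate_node_list(start_node_id: int, end_node_id: int) -> List[str]:
--     """
--     指定したノードID範囲のカラム名リストを生成する。
--     Args:
--         start_node_id (int): 開始ノードID
--         end_node_id (int): 終了ノードID
--     Returns:
--         List[str]: カラム名リスト
--     """
--     if not (1 <= start_node_id <= 9999 and 1 <= end_node_id <= 9999):
--         raise ValueError("Node IDs must be between 1 and 9999")
--     if start_node_id > end_node_id: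
--         raise ValueError("Start node ID must be less than or equal to end node ID")
--     result = ["TIME"]
--     for node_id in range(start_node_id, end_node_id + 1):
--         node_prefix = f"ノード{node_id:04d}"
--         result.extend([
--             f"{node_prefix}:ノードID",
--             f"{node_prefix}:電波強度",
--             f"{node_prefix}:センサ種別"
--         ])
--         for i in range(1, 20):
--             result.extend([
--                 f"{node_prefix}:値{i}",
--                 f"{node_prefix}:スケール{i}",
--                 f"{node_prefix}:単位{i}"
--             ])
--     return result
-- ===== SOURCE B (Python) =====
-- # B: computes each column directly from its flat index k (node = k//60, field = k%60)
-- # in one arithmetic pass, instead of A's nested per-node/per-sensor loops.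
-- _HEAD = (":ノードID", ":電波強度", ":センサ種別")
-- _KIND = (":値", ":スケール", ":単位")
--
--
-- def generate_node_list(start_node_id: int, end_node_id: int):
--     if not (1 <= start_node_id <= 9999 and 1 <= end_node_id <= 9999):
--         raise ValueError("Node IDs must be between 1 and 9999")
--     if start_node_id > end_node_id:
--         raise ValueError("Start node ID must be less than or equal to end node ID")
--
--     def column(k):
--         node, j = divmod(k, 60)
--         prefix = f"ノード{start_node_id + node:04d}"
--         if j < 3:
--             return prefix + _HEAD[j]
--         group, kind = divmod(j - 3, 3)
--         return prefix + _KIND[kind] + str(group + 1)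
--
--     n_cols = 60 * (end_node_id - start_node_id + 1)
--     return ["TIME"] + [column(k) for k in range(n_cols)]
-- ===== Notes on version B (the rewrite author's own statement) =====
-- stated objective: alternative
-- what changed: B computes each column name directly from its flat index k via divmod arithmetic (node = k//60, field = k%60, sensor group/kind from (field-3) divmod 3) in a single pass over range(60*n), instead of A's nested per-node and per-sensor loops.
import Mathlib
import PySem

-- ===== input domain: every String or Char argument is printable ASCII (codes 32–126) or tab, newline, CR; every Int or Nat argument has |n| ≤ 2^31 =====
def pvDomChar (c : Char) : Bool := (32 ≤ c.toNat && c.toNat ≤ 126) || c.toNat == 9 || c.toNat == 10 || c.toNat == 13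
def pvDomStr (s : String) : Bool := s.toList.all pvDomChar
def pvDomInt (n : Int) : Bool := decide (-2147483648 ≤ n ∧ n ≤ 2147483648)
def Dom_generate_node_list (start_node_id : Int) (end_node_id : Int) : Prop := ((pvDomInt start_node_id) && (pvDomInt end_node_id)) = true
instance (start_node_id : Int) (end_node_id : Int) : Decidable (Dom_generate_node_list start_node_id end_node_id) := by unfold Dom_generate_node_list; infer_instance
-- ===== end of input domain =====

-- B computes each column directly from its flat index k (node = k//60, field = k%60)
-- in one arithmetic pass instead of A's nested per-node/per-sensor loops (objective: alternative).


-- ===== PORT A =====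
-- f"{n:04d}" for the node ids admitted by Pre_ (1..9999, nonnegative): zero-pad str(n) to width 4
def pad04 (n : Int) : String :=
  String.ofList (List.replicate (4 - (PySem.Int.toChars n).length) '0' ++ PySem.Int.toChars n)

-- node_prefix = f"ノード{node_id:04d}"
def node_prefix (node_id : Int) : String := "ノード" ++ pad04 node_id

def generate_node_list (start_node_id : Int) (end_node_id : Int) : List String :=
  (PySem.List.pyRange start_node_id (end_node_id + 1) 1).foldl
    (fun result node_id =>
      (PySem.List.pyRange 1 20 1).foldl
        (fun result i =>
          result ++ [node_prefix node_id ++ ":値" ++ PySem.Int.toStr i,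
                     node_prefix node_id ++ ":スケール" ++ PySem.Int.toStr i,
                     node_prefix node_id ++ ":単位" ++ PySem.Int.toStr i])
        (result ++ [node_prefix node_id ++ ":ノードID",
                    node_prefix node_id ++ ":電波強度",
                    node_prefix node_id ++ ":センサ種別"]))
    ["TIME"]

-- ===== PORT B =====
-- _HEAD and _KIND tuples of Source B
def pvHead : List String := [":ノードID", ":電波強度", ":センサ種別"]
def pvKind : List String := [":値", ":スケール", ":単位"]

-- column(k) of Source B; the tuple lookups _HEAD[j] / _KIND[kind] always hit an
-- in-range index (0 ≤ j < 3, 0 ≤ kind < 3), so pyGetD with a dummy default is exact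
def pvColumn (start_node_id : Int) (k : Int) : String :=
  let node := PySem.Int.floordiv k 60
  let j := PySem.Int.mod k 60
  let pre := "ノード" ++ pad04 (start_node_id + node)
  if j < 3 then
    pre ++ PySem.List.pyGetD pvHead j ""
  else
    let group := PySem.Int.floordiv (j - 3) 3
    let kind := PySem.Int.mod (j - 3) 3
    pre ++ (PySem.List.pyGetD pvKind kind "" ++ PySem.Int.toStr (group + 1))

def generate_node_list_alt (start_node_id : Int) (end_node_id : Int) : List String :=
  "TIME" :: (PySem.List.pyRange 0 (60 * (end_node_id - start_node_id + 1)) 1).map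
    (fun k => pvColumn start_node_id k)

-- ===== PRECONDITION & SPEC =====
-- exactly the inputs on which A returns (outside, A raises ValueError)
def Pre_generate_node_list (start_node_id : Int) (end_node_id : Int) : Prop :=
  1 ≤ start_node_id ∧ start_node_id ≤ 9999 ∧ 1 ≤ end_node_id ∧ end_node_id ≤ 9999 ∧ start_node_id ≤ end_node_id
instance (start_node_id : Int) (end_node_id : Int) : Decidable (Pre_generate_node_list start_node_id end_node_id) := by unfold Pre_generate_node_list; infer_instance

def pvWitness_generate_node_list : Int × Int := (2, 3)

def Spec_generate_node_list (start_node_id : Int) (end_node_id : Int) (out : List String) : Prop := out = generate_node_list_alt start_node_id end_node_id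
instance (start_node_id : Int) (end_node_id : Int) (out : List String) : Decidable (Spec_generate_node_list start_node_id end_node_id out) := by unfold Spec_generate_node_list; infer_instance

-- ===== CLAIM (what is proved, stated in full; the proofs are below) =====
def Claim_equal_generate_node_list : Prop := ∀ (start_node_id : Int) (end_node_id : Int), Dom_generate_node_list start_node_id end_node_id → Pre_generate_node_list start_node_id end_node_id → Spec_generate_node_list start_node_id end_node_id (generate_node_list start_node_id end_node_id)

-- ===== LEMMAS AND PROOFS =====

-- the 60 per-node suffixes in A's emission order
def sufT : List String :=
  (PySem.List.pyRange 1 20 1).foldl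
    (fun acc i =>
      acc ++ [":値" ++ PySem.Int.toStr i, ":スケール" ++ PySem.Int.toStr i, ":単位" ++ PySem.Int.toStr i])
    [":ノードID", ":電波強度", ":センサ種別"]

-- the suffix pvColumn emits for field index j (0 ≤ j < 60)
def sufOf (j : Int) : String :=
  if j < 3 then PySem.List.pyGetD pvHead j ""
  else PySem.List.pyGetD pvKind (PySem.Int.mod (j - 3) 3) "" ++
       PySem.Int.toStr (PySem.Int.floordiv (j - 3) 3 + 1)

lemma div60 (m j : Int) (h0 : 0 ≤ j) (h1 : j < 60) :
    PySem.Int.floordiv (60 * m + j) 60 = m ∧ PySem.Int.mod (60 * m + j) 60 = j := by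
  have hd : PySem.Int.floordiv (60 * m + j) 60 = m := by
    rw [PySem.Int.floordiv_eq_iff_of_pos (by norm_num)]
    constructor <;> nlinarith
  refine ⟨hd, ?_⟩
  have h := PySem.Int.floordiv_mul_add_mod (60 * m + j) 60
  rw [hd] at h
  omega

lemma pvColumn_eq (s m j : Int) (h0 : 0 ≤ j) (h1 : j < 60) :
    pvColumn s (60 * m + j) = "ノード" ++ pad04 (s + m) ++ sufOf j := by
  obtain ⟨hd, hm⟩ := div60 m j h0 h1
  unfold pvColumn sufOf
  simp only [hd, hm]
  split_ifs <;> rw [String.append_assoc]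

-- A's per-node block (three headers, then the inner 1..19 loop) equals the mapped suffix template
lemma block_eq (acc : List String) (p : String) :
    (PySem.List.pyRange 1 20 1).foldl
      (fun result i =>
        result ++ [p ++ ":値" ++ PySem.Int.toStr i,
                   p ++ ":スケール" ++ PySem.Int.toStr i,
                   p ++ ":単位" ++ PySem.Int.toStr i])
      (acc ++ [p ++ ":ノードID", p ++ ":電波強度", p ++ ":センサ種別"])
    = acc ++ sufT.map (fun suffix => p ++ suffix) := by
  rw [PySem.List.foldl_append_eq_flatMap]
  have h : PySem.List.pyRange 1 20 1 = [1,2,3,4,5,6,7,8,9,10,11,12,13,14,15,16,17,18,19] := by decide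
  simp [sufT, h, String.append_assoc]

-- the whole outer loop of A in flatMap form
lemma loopA_eq (l : List Int) (acc : List String) :
    l.foldl
      (fun result node_id =>
        (PySem.List.pyRange 1 20 1).foldl
          (fun result i =>
            result ++ [node_prefix node_id ++ ":値" ++ PySem.Int.toStr i,
                       node_prefix node_id ++ ":スケール" ++ PySem.Int.toStr i,
                       node_prefix node_id ++ ":単位" ++ PySem.Int.toStr i])
          (result ++ [node_prefix node_id ++ ":ノードID",
                      node_prefix node_id ++ ":電波強度",
                      node_prefix node_id ++ ":センサ種別"]))
      acc
    = acc ++ l.flatMap (fun node_id => sufT.map (fun suffix => "ノード" ++ pad04 node_id ++ suffix)) := by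
  induction l generalizing acc with
  | nil => simp
  | cons n t ih =>
    rw [List.foldl_cons, block_eq, ih, List.flatMap_cons, List.append_assoc]
    rfl

-- the 60 field suffixes B derives by index arithmetic are exactly A's template
lemma sufOf_range : (List.range 60).map (fun (j : Nat) => sufOf (j : Int)) = sufT := by decide

-- one node's worth of B's columns
lemma column_node (s m : Int) :
    (List.range 60).map (fun (j : Nat) => pvColumn s (60 * m + (j : Int)))
    = sufT.map (fun suffix => "ノード" ++ pad04 (s + m) ++ suffix) := by
  have h1 : (List.range 60).map (fun (j : Nat) => pvColumn s (60 * m + (j : Int)))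
      = (List.range 60).map (fun (j : Nat) => "ノード" ++ pad04 (s + m) ++ sufOf (j : Int)) := by
    apply List.map_congr_left
    intro j hj
    have hj60 : (j : Int) < 60 := by
      have := List.mem_range.mp hj
      omega
    exact pvColumn_eq s m (j : Int) (by omega) hj60
  rw [h1, ← sufOf_range, List.map_map]
  rfl

-- B's single flat pass, node by node
lemma mapB (s : Int) (N : Nat) :
    (List.range (60 * N)).map (fun (k : Nat) => pvColumn s (0 + (k : Int)))
    = (List.range N).flatMap (fun (m : Nat) => sufT.map (fun suffix => "ノード" ++ pad04 (s + (m : Int)) ++ suffix)) := by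
  induction N with
  | zero => simp
  | succ N ih =>
    have h60 : 60 * (N + 1) = 60 * N + 60 := by ring
    rw [h60, List.range_add, List.map_append, ih, List.range_succ (n := N), List.flatMap_append]
    congr 1
    have : ∀ j ∈ List.range 60, pvColumn s (0 + ((60 * N + j : Nat) : Int))
        = pvColumn s (60 * (N : Int) + (j : Int)) := by
      intro j _
      congr 1
      push_cast
      ring
    rw [List.map_map]
    simp only [Function.comp_def]
    rw [List.map_congr_left (fun j hj => this j hj), column_node]
    simp

-- ===== VERDICT (by name: the statement is the Claim_ definition above) =====
theorem generate_node_list_spec : Claim_equal_generate_node_list := by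
  intro s e _ hpre
  obtain ⟨h1, h2, h3, h4, h5⟩ := hpre
  unfold Spec_generate_node_list generate_node_list generate_node_list_alt
  rw [loopA_eq, PySem.List.pyRange_one s (e + 1), PySem.List.pyRange_one 0, List.flatMap_map]
  have hN : (60 * (e - s + 1) - 0).toNat = 60 * (e + 1 - s).toNat := by omega
  rw [hN]
  simp only [List.map_map, Function.comp_def]
  rw [mapB]
  rfl
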